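-- pv_equiv track=rewrite | github.com/mikealfare/advent-of-code-2020 | src/advent_of_code/day_10.py | get_valid_adaptor_combinations
-- ===== SOURCE A (Python) =====
-- from typing import List
--
-- def get_valid_adaptor_combinations(joltage_differences: List[int]) -> int:
--
--     if 3 in joltage_differences:
--         first_3 = joltage_differences.index(3)
--         subset_before = joltage_differences[:first_3]
--         subset_after = joltage_differences[first_3+1:]
--         return get_valid_adaptor_combinations(subset_before) * get_valid_adaptor_combinations(subset_after)
--
--     if len(joltage_differences) == 0:
--         return 1
--     if joltage_differences[0] > 3:
--         return 0
--     if len(joltage_differences) == 1: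
--         return 1
--
--     remaining_differences_if_included = joltage_differences[1:]
--     combinations_including_this_adaptor = get_valid_adaptor_combinations(remaining_differences_if_included)
--
--     remaining_differences_if_excluded = joltage_differences[1:]
--     remaining_differences_if_excluded[0] += joltage_differences[0]
--     combinations_excluding_this_adaptor = get_valid_adaptor_combinations(remaining_differences_if_excluded)
--
--     return combinations_including_this_adaptor + combinations_excluding_this_adaptor
-- ===== SOURCE B (Python) =====
-- from typing import List
--
-- def _segment_ways(seg: List[int]) -> int:
--     """Bottom-up DP: ways[i] = number of valid chains for seg[i:], for a 3-free segment."""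
--     n = len(seg)
--     ways = [0] * (n + 1)
--     ways[n] = 1
--     for i in range(n - 1, -1, -1):
--         total = 0
--         v = seg[i]
--         j = i + 1
--         while True:
--             if v == 3:
--                 total += ways[j]
--                 break
--             if v > 3:
--                 break
--             if j == n:
--                 total += 1
--                 break
--             total += ways[j]
--             v += seg[j]
--             j += 1
--         ways[i] = total
--     return ways[0]
--
-- def get_valid_adaptor_combinations(joltage_differences: List[int]) -> int:
--     result = 1
--     seg: List[int] = []
--     for d in joltage_differences:
--         if d == 3:
--             result *= _segment_ways(seg)
--             seg = []
--         else:
--             seg.append(d)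
--     return result * _segment_ways(seg)
-- ===== Notes on version B (the rewrite author's own statement) =====
-- stated objective: faster
-- what changed: Replaced A's exponential include/exclude recursion (with repeated list slicing at each 3) by a single left-to-right pass that splits the list at every 3 and, per 3-free segment, a bottom-up dynamic-programming table of ways-per-suffix; intended as asymptotically faster (A branches 2-way per element): the probe measured B 1.92x at the largest size both finished and A timed out at n=64 where B returned.
import Mathlib
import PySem

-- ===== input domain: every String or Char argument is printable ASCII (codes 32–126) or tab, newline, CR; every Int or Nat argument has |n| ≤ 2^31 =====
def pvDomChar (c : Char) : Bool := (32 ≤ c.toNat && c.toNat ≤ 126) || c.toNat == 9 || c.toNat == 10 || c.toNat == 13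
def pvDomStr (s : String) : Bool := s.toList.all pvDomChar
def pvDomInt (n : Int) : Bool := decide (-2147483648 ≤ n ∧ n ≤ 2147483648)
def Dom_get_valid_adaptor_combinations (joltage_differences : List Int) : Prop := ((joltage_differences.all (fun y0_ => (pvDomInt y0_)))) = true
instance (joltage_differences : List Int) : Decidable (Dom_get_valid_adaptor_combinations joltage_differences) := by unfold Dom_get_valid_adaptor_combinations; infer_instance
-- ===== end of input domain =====

-- B replaces A's exponential include/exclude recursion by split-at-3 plus a bottom-up suffix DP
-- per segment (intended as faster: the probe measured B 1.92x at the largest size both finished,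
-- and A timed out at n=64 where B returned; neither program mutates its argument).

-- ===== PORT A =====
-- 'if 3 in l' + 'l.index(3)' are ported together by matching on PySem.List.index? l 3
-- (some k ↔ 3 ∈ l, k its first index); the slices l[:k] and l[k+1:] with 0 ≤ k < len
-- are exactly l.take k and l.drop (k+1) (PySem.List.slice_to_natCast / slice_from_natCast).
def get_valid_adaptor_combinations (joltage_differences : List Int) : Int :=
  match h : PySem.List.index? joltage_differences 3 with
  | some k =>
      get_valid_adaptor_combinations (joltage_differences.take k) *
        get_valid_adaptor_combinations (joltage_differences.drop (k + 1))
  | none =>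
      match joltage_differences with
      | [] => 1
      | d :: rest =>
        if d > 3 then 0
        else match rest with
          | [] => 1
          | a :: t =>
              get_valid_adaptor_combinations (a :: t) +
                get_valid_adaptor_combinations ((a + d) :: t)
  termination_by joltage_differences.length
  decreasing_by
  · obtain ⟨hk, -, -⟩ := PySem.List.getElem_of_index?_eq_some h
    simp; omega
  · obtain ⟨hk, -, -⟩ := PySem.List.getElem_of_index?_eq_some h
    simp; omega
  · simp
  · simp

-- ===== PORT B =====
-- inner while-loop of _segment_ways: v = running merged gap, r = seg[j:], ws = ways[j:]
-- (ws always has length r.length + 1; the (_ :: _, []) case is unreachable).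
def pvInner : Int → List Int → List Int → Int
  | v, r, ws =>
    if v = 3 then ws.headI
    else if v > 3 then 0
    else
      match r, ws with
      | [], _ => 1
      | a :: r', w :: ws' => w + pvInner (v + a) r' ws'
      | _ :: _, [] => 0

-- the ways array built back-to-front: pvWaysList seg = [ways[0], …, ways[n]]
def pvWaysList : List Int → List Int
  | [] => [1]
  | d :: rest => pvInner d rest (pvWaysList rest) :: pvWaysList rest

def pvSegWays (seg : List Int) : Int := (pvWaysList seg).headI

-- the body of B's for-loop over joltage_differences
def pvStep (p : Int × List Int) (d : Int) : Int × List Int :=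
  if d = 3 then (p.1 * pvSegWays p.2, []) else (p.1, p.2 ++ [d])

def get_valid_adaptor_combinations_alt (joltage_differences : List Int) : Int :=
  let p := joltage_differences.foldl pvStep (1, [])
  p.1 * pvSegWays p.2

-- ===== PRECONDITION & SPEC =====
def Spec_get_valid_adaptor_combinations (joltage_differences : List Int) (out : Int) : Prop := out = get_valid_adaptor_combinations_alt joltage_differences
instance (joltage_differences : List Int) (out : Int) : Decidable (Spec_get_valid_adaptor_combinations joltage_differences out) := by unfold Spec_get_valid_adaptor_combinations; infer_instance

-- ===== CLAIM (what is proved, stated in full; the proofs are below) =====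
def Claim_equal_get_valid_adaptor_combinations : Prop := ∀ (joltage_differences : List Int), Dom_get_valid_adaptor_combinations joltage_differences → Spec_get_valid_adaptor_combinations joltage_differences (get_valid_adaptor_combinations joltage_differences)

-- ===== LEMMAS AND PROOFS =====

theorem pvA_nil : get_valid_adaptor_combinations [] = 1 := by
  rw [get_valid_adaptor_combinations]
  simp [PySem.List.index?_eq_idxOf?]

-- unfolding lemmas for A's two top-level branches
theorem pvA_unfold_some (l : List Int) (k : Nat)
    (h : PySem.List.index? l 3 = some k) :
    get_valid_adaptor_combinations l
      = get_valid_adaptor_combinations (l.take k) *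
          get_valid_adaptor_combinations (l.drop (k + 1)) := by
  rw [get_valid_adaptor_combinations]
  split
  · next k' heq => rw [heq] at h; injection h with h; subst h; rfl
  · next heq => rw [heq] at h; exact absurd h (by simp)

theorem pvA_unfold_none (d : Int) (rest : List Int)
    (h : PySem.List.index? (d :: rest) 3 = none) :
    get_valid_adaptor_combinations (d :: rest)
      = if d > 3 then 0
        else match rest with
          | [] => (1 : Int)
          | a :: t =>
              get_valid_adaptor_combinations (a :: t) +
                get_valid_adaptor_combinations ((a + d) :: t) := by
  rw [get_valid_adaptor_combinations]
  split
  · next k' heq => rw [heq] at h; exact absurd h (by simp)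
  · rfl

theorem pvA_cons_three (r : List Int) :
    get_valid_adaptor_combinations (3 :: r) = get_valid_adaptor_combinations r := by
  have h0 : PySem.List.index? (3 :: r) 3 = some 0 := by
    rw [PySem.List.index?_cons_self]
  rw [pvA_unfold_some (3 :: r) 0 h0]
  simp only [List.take_zero, List.drop_succ_cons, List.drop_zero, pvA_nil, one_mul]

-- core segment lemma: on a 3-free tail r, the inner DP loop seeded with merged value v
-- computes exactly A (v :: r)
theorem pvInner_eq : ∀ (r : List Int), 3 ∉ r → ∀ (v : Int),
    pvInner v r (pvWaysList r) = get_valid_adaptor_combinations (v :: r) := by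
  intro r
  induction r with
  | nil =>
      intro _ v
      by_cases hv3 : v = 3
      · subst hv3
        rw [pvA_cons_three, pvA_nil]
        simp [pvInner, pvWaysList]
      · have hn : PySem.List.index? [v] 3 = none := by
          rw [PySem.List.index?_eq_none_iff]
          simp only [List.mem_singleton]
          exact fun h => hv3 h.symm
        rw [pvA_unfold_none v [] hn]
        rw [pvInner.eq_def]
        by_cases hv : v > 3
        · simp [hv3, hv]
        · simp [hv3, hv]
  | cons a r' ih =>
      intro h3 v
      have ha : a ≠ 3 := fun h => h3 (h ▸ List.mem_cons_self)
      have hr' : 3 ∉ r' := fun hm => h3 (List.mem_cons_of_mem _ hm)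
      have hhead : (pvWaysList (a :: r')).headI
          = get_valid_adaptor_combinations (a :: r') := by
        simpa [pvWaysList] using ih hr' a
      by_cases hv3 : v = 3
      · subst hv3
        rw [pvA_cons_three]
        rw [pvInner.eq_def]
        simp only [if_pos]
        exact hhead
      · have hn : PySem.List.index? (v :: a :: r') 3 = none := by
          rw [PySem.List.index?_eq_none_iff]
          intro hm
          rcases List.mem_cons.mp hm with h | hm'
          · exact hv3 h.symm
          rcases List.mem_cons.mp hm' with h | h
          · exact ha h.symm
          · exact hr' h
        rw [pvA_unfold_none v (a :: r') hn]
        rw [pvInner.eq_def]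
        by_cases hv : v > 3
        · simp [hv3, hv]
        · simp only [pvWaysList, if_neg hv3, if_neg hv]
          rw [ih hr' a, ih hr' (v + a)]
          have hc : a + v = v + a := by ring
          rw [hc]

-- on a 3-free segment, B's per-segment DP equals A
theorem pvSegWays_eq (seg : List Int) (h3 : 3 ∉ seg) :
    pvSegWays seg = get_valid_adaptor_combinations seg := by
  cases seg with
  | nil => simp [pvSegWays, pvWaysList, pvA_nil]
  | cons d rest =>
      have := pvInner_eq rest (fun hm => h3 (List.mem_cons_of_mem _ hm)) d
      simpa [pvSegWays, pvWaysList] using this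

theorem pvFold_no3 (l : List Int) (h3 : 3 ∉ l) :
    ∀ (r : Int) (seg : List Int), l.foldl pvStep (r, seg) = (r, seg ++ l) := by
  induction l with
  | nil => intro r seg; simp
  | cons d t ih =>
      intro r seg
      have hd : d ≠ 3 := fun h => h3 (h ▸ List.mem_cons_self)
      have ht : 3 ∉ t := fun hm => h3 (List.mem_cons_of_mem _ hm)
      simp [pvStep, hd, ih ht]

theorem pvFold_scale (l : List Int) :
    ∀ (r : Int) (seg : List Int),
      (l.foldl pvStep (r, seg)).1 * pvSegWays (l.foldl pvStep (r, seg)).2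
        = r * ((l.foldl pvStep (1, seg)).1 * pvSegWays (l.foldl pvStep (1, seg)).2) := by
  induction l with
  | nil => intro r seg; simp
  | cons d t ih =>
      intro r seg
      by_cases hd : d = 3
      · simp only [List.foldl_cons, pvStep, hd, if_true]
        rw [ih (r * pvSegWays seg) [], ih (1 * pvSegWays seg) []]
        ring
      · simp only [List.foldl_cons, pvStep, if_neg hd]
        exact ih r (seg ++ [d])

theorem pvMain : ∀ (n : Nat) (l : List Int), l.length ≤ n →
    get_valid_adaptor_combinations l = get_valid_adaptor_combinations_alt l := by
  intro n
  induction n with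
  | zero =>
      intro l hl
      have : l = [] := List.eq_nil_of_length_eq_zero (Nat.le_zero.mp hl)
      subst this
      simp [pvA_nil, get_valid_adaptor_combinations_alt, pvSegWays, pvWaysList]
  | succ n ih =>
      intro l hl
      cases hidx : PySem.List.index? l 3 with
      | none =>
          have h3 : 3 ∉ l := (PySem.List.index?_eq_none_iff l 3).mp hidx
          have halt : get_valid_adaptor_combinations_alt l = pvSegWays l := by
            simp only [get_valid_adaptor_combinations_alt]
            rw [pvFold_no3 l h3 1 []]
            simp
          rw [halt, pvSegWays_eq l h3]
      | some k =>
          obtain ⟨pre, suf, hl', hk, hpre⟩ :=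
            (PySem.List.index?_eq_some_iff l 3 k).mp hidx
          subst hl'
          subst hk
          have htake : (pre ++ 3 :: suf).take pre.length = pre := by simp
          have hdrop : (pre ++ 3 :: suf).drop (pre.length + 1) = suf := by simp
          have hsuf : suf.length ≤ n := by
            have := hl; simp [List.length_append] at this; omega
          rw [pvA_unfold_some _ pre.length hidx, htake, hdrop]
          have halt : get_valid_adaptor_combinations_alt (pre ++ 3 :: suf)
              = (1 * pvSegWays pre) * get_valid_adaptor_combinations_alt suf := by
            simp only [get_valid_adaptor_combinations_alt]
            rw [List.foldl_append, pvFold_no3 pre hpre 1 [], List.foldl_cons]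
            have hstep : pvStep (1, ([] : List Int) ++ pre) 3 = (1 * pvSegWays pre, []) := by
              simp [pvStep]
            rw [hstep, pvFold_scale suf (1 * pvSegWays pre) []]
          rw [halt, pvSegWays_eq pre hpre, ih suf hsuf]
          ring

-- ===== VERDICT (by name: the statement is the Claim_ definition above) =====
theorem get_valid_adaptor_combinations_spec : Claim_equal_get_valid_adaptor_combinations := by
  intro l _
  unfold Spec_get_valid_adaptor_combinations
  exact (pvMain l.length l le_rfl).symm ▸ rfl
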